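-- pv_equiv track=rewrite | github.com/lololalayoho/Algo_share | 20210208/메뉴 리뉴얼/lololalayoho.py | chooseAnswer
-- ===== SOURCE A (Python) =====
-- def chooseAnswer(makecourses,course):
--     answer = []
--     for i in course:
--         max_value = 0
--         for j in makecourses:
--             if len(j[0]) == i and max_value < int(j[1]):
--                 max_value = int(j[1])
--         for j in makecourses:
--             if int(j[1]) == max_value and len(j[0]) == i:
--                 answer.append(j[0])
--     return sorted(answer)
-- ===== SOURCE B (Python) =====
-- def chooseAnswer(makecourses, course):
--     # one pass: group by name length, keeping the running max value and its names
--     groups = {}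
--     for name, v in makecourses:
--         L = len(name)
--         v = int(v)
--         m, ns = groups.get(L, (0, []))
--         if m < v:
--             groups[L] = (v, [name])
--         elif v == m:
--             groups[L] = (m, ns + [name])
--     answer = []
--     for i in course:
--         answer += groups.get(i, (0, []))[1]
--     return sorted(answer)
-- ===== Notes on version B (the rewrite author's own statement) =====
-- stated objective: faster
-- what changed: B builds a length-keyed dictionary of (running max, argmax names) in one pass over makecourses and answers each course length by a single lookup, instead of A's two full scans of makecourses per course entry.
import Mathlib
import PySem

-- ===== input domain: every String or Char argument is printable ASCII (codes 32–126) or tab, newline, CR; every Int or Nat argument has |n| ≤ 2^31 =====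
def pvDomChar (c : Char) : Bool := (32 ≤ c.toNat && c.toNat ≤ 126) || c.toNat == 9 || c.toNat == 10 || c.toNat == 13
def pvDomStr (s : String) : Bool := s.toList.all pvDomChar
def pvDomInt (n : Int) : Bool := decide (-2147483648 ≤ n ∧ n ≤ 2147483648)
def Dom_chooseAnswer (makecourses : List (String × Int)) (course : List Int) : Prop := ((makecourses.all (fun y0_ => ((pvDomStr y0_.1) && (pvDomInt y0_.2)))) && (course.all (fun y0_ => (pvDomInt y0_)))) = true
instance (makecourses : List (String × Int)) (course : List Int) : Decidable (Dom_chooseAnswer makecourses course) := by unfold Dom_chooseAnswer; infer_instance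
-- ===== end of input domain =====

-- B replaces A's two full scans of makecourses per course entry by a single pass building a
-- length-keyed dictionary of (max value, argmax names), then one lookup per course entry (faster).

-- ===== PORT A =====
def chooseAnswer (makecourses : List (String × Int)) (course : List Int) : List String :=
  let answer : List String := course.foldl (fun answer i =>
    -- max_value = 0; for j in makecourses: if len(j[0]) == i and max_value < int(j[1]): max_value = int(j[1])
    let maxValue : Int := makecourses.foldl (fun m j =>
      if PySem.Str.len j.1 = i ∧ m < j.2 then j.2 else m) 0
    -- for j in makecourses: if int(j[1]) == max_value and len(j[0]) == i: answer.append(j[0])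
    makecourses.foldl (fun ans j =>
      if j.2 = maxValue ∧ PySem.Str.len j.1 = i then ans ++ [j.1] else ans) answer) []
  PySem.List.sorted answer (fun s => s)

-- ===== PORT B =====
-- one grouping step of B's first loop: update (running max, its names) at key len(name)
def bStep (groups : PySem.Dict Int (Int × List String)) (p : String × Int) :
    PySem.Dict Int (Int × List String) :=
  let L := PySem.Str.len p.1
  let g := groups.getD L (0, [])
  if g.1 < p.2 then groups.insert L (p.2, [p.1])
  else if p.2 = g.1 then groups.insert L (g.1, g.2 ++ [p.1])
  else groups

def chooseAnswer_alt (makecourses : List (String × Int)) (course : List Int) : List String :=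
  let groups := makecourses.foldl bStep PySem.Dict.empty
  let answer : List String := course.foldl (fun ans i => ans ++ (groups.getD i (0, [])).2) []
  PySem.List.sorted answer (fun s => s)

-- ===== PRECONDITION & SPEC =====
def Spec_chooseAnswer (makecourses : List (String × Int)) (course : List Int) (out : List String) : Prop := out = chooseAnswer_alt makecourses course
instance (makecourses : List (String × Int)) (course : List Int) (out : List String) : Decidable (Spec_chooseAnswer makecourses course out) := by unfold Spec_chooseAnswer; infer_instance

-- ===== CLAIM (what is proved, stated in full; the proofs are below) =====
def Claim_equal_chooseAnswer : Prop := ∀ (makecourses : List (String × Int)) (course : List Int), Dom_chooseAnswer makecourses course → Spec_chooseAnswer makecourses course (chooseAnswer makecourses course)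

-- ===== LEMMAS AND PROOFS =====

-- the (max, names) update of B's grouping loop, for fixed-length entries only
def pairStep (g : Int × List String) (j : String × Int) : Int × List String :=
  if g.1 < j.2 then (j.2, [j.1]) else if j.2 = g.1 then (g.1, g.2 ++ [j.1]) else g

-- the running-max step (A's first inner loop, restricted to length-i entries)
def maxStep (m : Int) (j : String × Int) : Int :=
  if m < j.2 then j.2 else m

lemma le_foldl_maxStep (xs : List (String × Int)) (m : Int) : m ≤ xs.foldl maxStep m := by
  induction xs generalizing m with
  | nil => simp
  | cons j xs ih =>
    simp only [List.foldl_cons]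
    refine le_trans ?_ (ih (maxStep m j))
    unfold maxStep; split <;> omega

-- one bStep changes the group at key len(p.1) by pairStep and nothing else
lemma getD_bStep (d : PySem.Dict Int (Int × List String)) (p : String × Int) (L : Int) :
    (bStep d p).getD L (0, []) =
      if (p.1.length : Int) = L then pairStep (d.getD L (0, [])) p else d.getD L (0, []) := by
  unfold bStep pairStep
  simp only [PySem.Str.len_eq, String.length_toList]
  by_cases hL : (p.1.length : Int) = L
  · simp only [hL, ite_true]
    split_ifs
    · simp
    · simp
    · rfl
  · have hL' : ¬ L = (p.1.length : Int) := fun h => hL h.symm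
    simp only [hL, ite_false]
    split_ifs
    · simp [PySem.Dict.getD_insert, hL']
    · simp [PySem.Dict.getD_insert, hL']
    · rfl

-- B's dictionary at key L is the pairStep fold over the length-L entries
lemma getD_foldl_bStep (mc : List (String × Int)) (d : PySem.Dict Int (Int × List String)) (L : Int) :
    (mc.foldl bStep d).getD L (0, []) =
      (mc.filter (fun j => (j.1.length : Int) == L)).foldl pairStep (d.getD L (0, [])) := by
  induction mc generalizing d with
  | nil => simp
  | cons p mc ih =>
    simp only [List.foldl_cons, List.filter_cons]
    rw [ih, getD_bStep]
    by_cases h : (p.1.length : Int) = L <;> simp [h]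

-- the pairStep fold computes (running max, names achieving the final max)
lemma foldl_pairStep_eq (xs : List (String × Int)) (m : Int) (ns : List String) :
    xs.foldl pairStep (m, ns) =
      (xs.foldl maxStep m,
       (if xs.foldl maxStep m = m then ns else []) ++
         (xs.filter (fun j => j.2 == xs.foldl maxStep m)).map Prod.fst) := by
  induction xs generalizing m ns with
  | nil => simp
  | cons j xs ih =>
    have hmono := le_foldl_maxStep xs
    simp only [List.foldl_cons, List.filter_cons]
    by_cases h1 : m < j.2
    · simp only [show pairStep (m, ns) j = (j.2, [j.1]) from by simp [pairStep, h1],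
                 show maxStep m j = j.2 from by simp [maxStep, h1]]
      rw [ih]
      have hM := hmono j.2
      generalize xs.foldl maxStep j.2 = M at hM ⊢
      by_cases hj : M = j.2
      · subst hj
        simp [show ¬ (j.2 = m) from by omega]
      · have hj' : ¬ (j.2 == M) = true := by simp; omega
        simp [hj, hj', show ¬ M = m from by omega]
    · by_cases h2 : j.2 = m
      · simp only [show pairStep (m, ns) j = (m, ns ++ [j.1]) from by simp [pairStep, h2],
                   show maxStep m j = m from by simp [maxStep, h1]]
        rw [ih]
        have hM := hmono m
        generalize xs.foldl maxStep m = M at hM ⊢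
        by_cases hMm : M = m
        · simp [hMm, h2, List.append_assoc]
        · have hj' : ¬ (j.2 == M) = true := by simp; omega
          simp [hMm, hj']
      · simp only [show pairStep (m, ns) j = (m, ns) from by simp [pairStep, h1, h2],
                   show maxStep m j = m from by simp [maxStep, h1]]
        rw [ih]
        have hM := hmono m
        generalize xs.foldl maxStep m = M at hM ⊢
        have hj' : ¬ (j.2 == M) = true := by simp; omega
        simp [hj']

-- A's first inner loop equals the unconditional max fold over the length-i entries
lemma maxA_eq_filter (mc : List (String × Int)) (i : Int) (m : Int) :
    mc.foldl (fun m j => if (j.1.length : Int) = i ∧ m < j.2 then j.2 else m) m =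
      (mc.filter (fun j => (j.1.length : Int) == i)).foldl maxStep m := by
  induction mc generalizing m with
  | nil => simp
  | cons j mc ih =>
    simp only [List.foldl_cons, List.filter_cons]
    by_cases h : (j.1.length : Int) = i
    · simp only [h, beq_self_eq_true, ite_true, List.foldl_cons]
      rw [ih]
      congr 1
      simp [maxStep]
    · have h' : ¬ ((j.1.length : Int) == i) = true := by simp [h]
      simp only [h', Bool.false_eq_true, ite_false]
      rw [← ih]
      congr 1
      simp [h]

-- A's second inner loop appends the length-i entries whose value is M
lemma namesA_eq_filter (mc : List (String × Int)) (i M : Int) (ans : List String) :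
    mc.foldl (fun ans j => if j.2 = M ∧ (j.1.length : Int) = i then ans ++ [j.1] else ans) ans =
      ans ++ ((mc.filter (fun j => (j.1.length : Int) == i)).filter (fun j => j.2 == M)).map Prod.fst := by
  induction mc generalizing ans with
  | nil => simp
  | cons j mc ih =>
    simp only [List.foldl_cons, List.filter_cons]
    by_cases hL : (j.1.length : Int) = i <;> by_cases hV : j.2 = M <;>
      simp [hL, hV, ih, List.append_assoc]

-- per course entry, A's appended segment equals B's group lookup
lemma segment_eq (mc : List (String × Int)) (i : Int) (ans : List String) :
    mc.foldl (fun ans j =>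
        if j.2 = (mc.foldl (fun m j => if (j.1.length : Int) = i ∧ m < j.2 then j.2 else m) 0) ∧
           (j.1.length : Int) = i then ans ++ [j.1] else ans) ans =
      ans ++ ((mc.foldl bStep PySem.Dict.empty).getD i (0, [])).2 := by
  rw [getD_foldl_bStep, PySem.Dict.getD_empty, foldl_pairStep_eq, namesA_eq_filter,
      maxA_eq_filter]
  simp

-- both answer-building loops over course produce the same list
lemma answer_fold_eq (mc : List (String × Int)) (course : List Int) (ans : List String) :
    course.foldl (fun ans i =>
        mc.foldl (fun ans j =>
          if j.2 = (mc.foldl (fun m j => if (j.1.length : Int) = i ∧ m < j.2 then j.2 else m) 0) ∧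
             (j.1.length : Int) = i then ans ++ [j.1] else ans) ans) ans =
      course.foldl (fun ans i => ans ++ ((mc.foldl bStep PySem.Dict.empty).getD i (0, [])).2) ans := by
  induction course generalizing ans with
  | nil => rfl
  | cons i course ih =>
    simp only [List.foldl_cons]
    rw [segment_eq, ih]

-- ===== VERDICT (by name: the statement is the Claim_ definition above) =====
theorem chooseAnswer_spec : Claim_equal_chooseAnswer := by
  intro mc course _
  unfold Spec_chooseAnswer chooseAnswer chooseAnswer_alt
  simp only [PySem.Str.len_eq, String.length_toList]
  congr 1
  exact answer_fold_eq mc course []
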